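-- pv_equiv track=rewrite | github.com/Abrock91/astroedge | astrology.py | zodiac_compatibility
-- ===== SOURCE A (Python) =====
-- ANIMAL_ELEMENT = {
--     "Rat": "Water", "Ox": "Earth", "Tiger": "Wood", "Rabbit": "Wood",
--     "Dragon": "Earth", "Snake": "Fire", "Horse": "Fire", "Goat": "Earth",
--     "Monkey": "Metal", "Rooster": "Metal", "Dog": "Earth", "Pig": "Water",
-- }
--
-- ZODIAC_CLASHES = [
--     {"Rat", "Horse"}, {"Ox", "Goat"}, {"Tiger", "Monkey"},
--     {"Rabbit", "Rooster"}, {"Dragon", "Dog"}, {"Snake", "Pig"},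
-- ]
--
-- ZODIAC_TRIOS = [
--     {"Rat", "Dragon", "Monkey"},
--     {"Ox", "Snake", "Rooster"},
--     {"Tiger", "Horse", "Dog"},
--     {"Rabbit", "Goat", "Pig"},
-- ]
--
-- ELEMENT_GENERATES = {  # generates → strong synergy
--     "Wood": "Fire", "Fire": "Earth", "Earth": "Metal",
--     "Metal": "Water", "Water": "Wood",
-- }
--
-- ELEMENT_CONTROLS = {  # controls → conflict
--     "Wood": "Earth", "Earth": "Water", "Water": "Fire",
--     "Fire": "Metal", "Metal": "Wood",
-- }
--
-- def get_animal_element(animal: str) -> str: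
--     return ANIMAL_ELEMENT.get(animal, "Earth")
--
-- def zodiac_compatibility(animal1: str, animal2: str) -> int:
--     """Returns compatibility score 0-100 between two zodiac animals."""
--     pair = {animal1, animal2}
--
--     # Clash = very low
--     for clash in ZODIAC_CLASHES:
--         if pair == clash:
--             return 15
--
--     # Trio match = excellent
--     for trio in ZODIAC_TRIOS:
--         if animal1 in trio and animal2 in trio:
--             return 92
--
--     # Same animal = good
--     if animal1 == animal2:
--         return 80
--
--     # Element relationship
--     elem1 = get_animal_element(animal1)
--     elem2 = get_animal_element(animal2)
--
--     if ELEMENT_GENERATES.get(elem1) == elem2: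
--         return 78  # elem1 generates elem2 — supportive
--     if ELEMENT_GENERATES.get(elem2) == elem1:
--         return 75  # elem2 generates elem1 — also good
--     if ELEMENT_CONTROLS.get(elem1) == elem2:
--         return 35  # elem1 controls elem2 — friction
--     if ELEMENT_CONTROLS.get(elem2) == elem1:
--         return 40  # elem2 controls elem1 — friction
--
--     return 60  # neutral
-- ===== SOURCE B (Python) =====
-- ANIMAL_ELEMENT = {
--     "Rat": "Water", "Ox": "Earth", "Tiger": "Wood", "Rabbit": "Wood",
--     "Dragon": "Earth", "Snake": "Fire", "Horse": "Fire", "Goat": "Earth",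
--     "Monkey": "Metal", "Rooster": "Metal", "Dog": "Earth", "Pig": "Water",
-- }
--
-- ZODIAC_CLASHES = [
--     {"Rat", "Horse"}, {"Ox", "Goat"}, {"Tiger", "Monkey"},
--     {"Rabbit", "Rooster"}, {"Dragon", "Dog"}, {"Snake", "Pig"},
-- ]
--
-- ZODIAC_TRIOS = [
--     {"Rat", "Dragon", "Monkey"},
--     {"Ox", "Snake", "Rooster"},
--     {"Tiger", "Horse", "Dog"},
--     {"Rabbit", "Goat", "Pig"},
-- ]
--
-- ELEMENT_GENERATES = {
--     "Wood": "Fire", "Fire": "Earth", "Earth": "Metal",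
--     "Metal": "Water", "Water": "Wood",
-- }
--
-- ELEMENT_CONTROLS = {
--     "Wood": "Earth", "Earth": "Water", "Water": "Fire",
--     "Fire": "Metal", "Metal": "Wood",
-- }
--
-- # One lookup table built once: clash pairs score 15, every (ordered) pair from a
-- # trio -- including the diagonal (x, x) -- scores 92; keys are sorted 2-tuples.
-- PAIR_SCORES = {}
-- for clash in ZODIAC_CLASHES:
--     a, b = sorted(clash)
--     PAIR_SCORES[(a, b)] = 15
-- for trio in ZODIAC_TRIOS:
--     members = sorted(trio)
--     for x in members:
--         for y in members:
--             if x <= y and (x, y) not in PAIR_SCORES: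
--                 PAIR_SCORES[(x, y)] = 92
--
-- def zodiac_compatibility(animal1: str, animal2: str) -> int:
--     """Returns compatibility score 0-100 between two zodiac animals."""
--     key = (animal1, animal2) if animal1 <= animal2 else (animal2, animal1)
--     score = PAIR_SCORES.get(key)
--     if score is not None:
--         return score
--     if animal1 == animal2:
--         return 80
--     elem1 = ANIMAL_ELEMENT.get(animal1, "Earth")
--     elem2 = ANIMAL_ELEMENT.get(animal2, "Earth")
--     if ELEMENT_GENERATES.get(elem1) == elem2:
--         return 78
--     if ELEMENT_GENERATES.get(elem2) == elem1:
--         return 75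
--     if ELEMENT_CONTROLS.get(elem1) == elem2:
--         return 35
--     if ELEMENT_CONTROLS.get(elem2) == elem1:
--         return 40
--     return 60
-- ===== Notes on version B (the rewrite author's own statement) =====
-- stated objective: idiomatic
-- what changed: Replaces the per-call clash-scan and trio-scan loops with a module-level score table built once, keyed by the sorted animal pair (trio diagonals included), so the call does one dict lookup before the unchanged same-animal rule and element cascade.
import Mathlib
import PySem

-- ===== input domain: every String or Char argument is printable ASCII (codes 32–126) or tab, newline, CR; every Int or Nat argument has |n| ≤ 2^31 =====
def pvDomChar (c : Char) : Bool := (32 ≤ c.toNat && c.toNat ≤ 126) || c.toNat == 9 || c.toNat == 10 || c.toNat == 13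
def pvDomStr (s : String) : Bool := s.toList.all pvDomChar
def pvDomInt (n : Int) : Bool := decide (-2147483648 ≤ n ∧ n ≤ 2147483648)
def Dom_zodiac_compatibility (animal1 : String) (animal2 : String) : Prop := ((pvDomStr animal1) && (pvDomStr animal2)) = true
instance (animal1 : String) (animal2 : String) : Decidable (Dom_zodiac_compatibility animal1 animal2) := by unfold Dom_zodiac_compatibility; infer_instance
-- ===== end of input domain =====

-- B replaces A's clash/trio scan loops by one precomputed lookup table keyed by the
-- sorted animal pair (built once at module level); the element cascade is unchanged.
-- Objective: idiomatic (same cost at this fixed data size).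

-- shared module-level constants (same-module context of both versions)
def pvAnimalElement : PySem.Dict String String := PySem.Dict.ofList
  [("Rat", "Water"), ("Ox", "Earth"), ("Tiger", "Wood"), ("Rabbit", "Wood"),
   ("Dragon", "Earth"), ("Snake", "Fire"), ("Horse", "Fire"), ("Goat", "Earth"),
   ("Monkey", "Metal"), ("Rooster", "Metal"), ("Dog", "Earth"), ("Pig", "Water")]

def pvClashes : List (PySem.Set String) :=
  [PySem.Set.ofList ["Rat", "Horse"], PySem.Set.ofList ["Ox", "Goat"],
   PySem.Set.ofList ["Tiger", "Monkey"], PySem.Set.ofList ["Rabbit", "Rooster"],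
   PySem.Set.ofList ["Dragon", "Dog"], PySem.Set.ofList ["Snake", "Pig"]]

def pvTrios : List (PySem.Set String) :=
  [PySem.Set.ofList ["Rat", "Dragon", "Monkey"],
   PySem.Set.ofList ["Ox", "Snake", "Rooster"],
   PySem.Set.ofList ["Tiger", "Horse", "Dog"],
   PySem.Set.ofList ["Rabbit", "Goat", "Pig"]]

def pvGenerates : PySem.Dict String String := PySem.Dict.ofList
  [("Wood", "Fire"), ("Fire", "Earth"), ("Earth", "Metal"), ("Metal", "Water"), ("Water", "Wood")]

def pvControls : PySem.Dict String String := PySem.Dict.ofList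
  [("Wood", "Earth"), ("Earth", "Water"), ("Water", "Fire"), ("Fire", "Metal"), ("Metal", "Wood")]

-- Python's string comparison is lexicographic on code points; Lean's String order is not
-- kernel-reducible, so both ports compare strings through their code-point lists (exact
-- for all code points, in particular on Dom's ASCII).
def pvCp (s : String) : List Nat := s.toList.map Char.toNat

-- ===== PORT A =====
def get_animal_element (animal : String) : String :=
  PySem.Dict.getD pvAnimalElement animal "Earth"

def zodiac_compatibility (animal1 : String) (animal2 : String) : Int :=
  let pair : PySem.Set String := PySem.Set.ofList [animal1, animal2]
  -- for clash in ZODIAC_CLASHES: if pair == clash: return 15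
  if pvClashes.any (fun clash => PySem.Set.equal pair clash) then 15
  -- for trio in ZODIAC_TRIOS: if animal1 in trio and animal2 in trio: return 92
  else if pvTrios.any (fun trio => PySem.Set.contains trio animal1 && PySem.Set.contains trio animal2) then 92
  else if animal1 == animal2 then 80
  else
    let elem1 := get_animal_element animal1
    let elem2 := get_animal_element animal2
    if PySem.Dict.get? pvGenerates elem1 == some elem2 then 78
    else if PySem.Dict.get? pvGenerates elem2 == some elem1 then 75
    else if PySem.Dict.get? pvControls elem1 == some elem2 then 35
    else if PySem.Dict.get? pvControls elem2 == some elem1 then 40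
    else 60

-- ===== PORT B =====
-- module-level table builder of Source B, transliterated (sorted = Python's sorted on the set's elements)
def pvPairScores : PySem.Dict (String × String) Int :=
  let d := pvClashes.foldl (fun d clash =>
    let s := PySem.List.sorted clash pvCp false
    PySem.Dict.insert d (PySem.List.pyGetD s 0 "", PySem.List.pyGetD s 1 "") 15) PySem.Dict.empty
  pvTrios.foldl (fun d trio =>
    let members := PySem.List.sorted trio pvCp false
    members.foldl (fun d x =>
      members.foldl (fun d y =>
        if pvCp x ≤ pvCp y ∧ !(PySem.Dict.contains d (x, y)) = true then PySem.Dict.insert d (x, y) 92 else d) d) d) d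

def zodiac_compatibility_alt (animal1 : String) (animal2 : String) : Int :=
  let key := if pvCp animal1 ≤ pvCp animal2 then (animal1, animal2) else (animal2, animal1)
  match PySem.Dict.get? pvPairScores key with
  | some score => score
  | none =>
    if animal1 == animal2 then 80
    else
      let elem1 := PySem.Dict.getD pvAnimalElement animal1 "Earth"
      let elem2 := PySem.Dict.getD pvAnimalElement animal2 "Earth"
      if PySem.Dict.get? pvGenerates elem1 == some elem2 then 78
      else if PySem.Dict.get? pvGenerates elem2 == some elem1 then 75
      else if PySem.Dict.get? pvControls elem1 == some elem2 then 35
      else if PySem.Dict.get? pvControls elem2 == some elem1 then 40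
      else 60

-- ===== PRECONDITION & SPEC =====
def Spec_zodiac_compatibility (animal1 : String) (animal2 : String) (out : Int) : Prop := out = zodiac_compatibility_alt animal1 animal2
instance (animal1 : String) (animal2 : String) (out : Int) : Decidable (Spec_zodiac_compatibility animal1 animal2 out) := by unfold Spec_zodiac_compatibility; infer_instance

-- ===== CLAIM (what is proved, stated in full; the proofs are below) =====
def Claim_equal_zodiac_compatibility : Prop := ∀ (animal1 : String) (animal2 : String), Dom_zodiac_compatibility animal1 animal2 → Spec_zodiac_compatibility animal1 animal2 (zodiac_compatibility animal1 animal2)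

-- ===== LEMMAS AND PROOFS =====

-- the twelve zodiac animals (proof-side helper)
def pvAnimals : List String :=
  ["Rat", "Ox", "Tiger", "Rabbit", "Dragon", "Snake", "Horse", "Goat", "Monkey", "Rooster", "Dog", "Pig"]

set_option maxRecDepth 8192 in
lemma pv_known_known : ∀ a1 ∈ pvAnimals, ∀ a2 ∈ pvAnimals,
    zodiac_compatibility a1 a2 = zodiac_compatibility_alt a1 a2 := by decide

lemma pv_clash_mem : ∀ c ∈ pvClashes, ∀ x ∈ c, x ∈ pvAnimals := by decide
lemma pv_trio_mem : ∀ t ∈ pvTrios, ∀ x ∈ t, x ∈ pvAnimals := by decide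
set_option maxRecDepth 8192 in
lemma pv_key_mem : ∀ p ∈ PySem.Dict.keys pvPairScores, p.1 ∈ pvAnimals ∧ p.2 ∈ pvAnimals := by decide

lemma pv_unknown (a1 a2 : String) (h : a1 ∉ pvAnimals ∨ a2 ∉ pvAnimals) :
    zodiac_compatibility a1 a2 = zodiac_compatibility_alt a1 a2 := by
  have hclash : pvClashes.any (fun clash => PySem.Set.equal (PySem.Set.ofList [a1, a2]) clash) = false := by
    rw [List.any_eq_false]
    intro c hc
    simp only [Bool.not_eq_true]
    rw [← Bool.not_eq_true, PySem.Set.equal_iff]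
    intro heq
    rcases h with h | h
    · exact h (pv_clash_mem c hc a1 ((heq a1).mp (by simp [PySem.Set.mem_ofList])))
    · exact h (pv_clash_mem c hc a2 ((heq a2).mp (by simp [PySem.Set.mem_ofList])))
  have htrio : pvTrios.any (fun trio => PySem.Set.contains trio a1 && PySem.Set.contains trio a2) = false := by
    rw [List.any_eq_false]
    intro t ht
    simp only [Bool.and_eq_true, not_and, Bool.not_eq_true] at *
    intro h1
    rw [← Bool.not_eq_true, PySem.Set.contains_iff]
    rcases h with h | h
    · exact absurd (pv_trio_mem t ht a1 ((PySem.Set.contains_iff _ _).mp h1)) h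
    · exact fun h2 => h (pv_trio_mem t ht a2 h2)
  have hkey : ∀ k : String × String, (k.1 = a1 ∧ k.2 = a2) ∨ (k.1 = a2 ∧ k.2 = a1) →
      PySem.Dict.get? pvPairScores k = none := by
    intro k hk
    rw [PySem.Dict.get?_eq_none_iff_not_mem_keys]
    intro hmem
    have := pv_key_mem k hmem
    rcases h with h | h <;> rcases hk with ⟨e1, e2⟩ | ⟨e1, e2⟩ <;>
      first
        | exact h (e1 ▸ this.1)
        | exact h (e2 ▸ this.2)
  unfold zodiac_compatibility zodiac_compatibility_alt
  simp only [hclash, htrio, Bool.false_eq_true, if_false]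
  by_cases hle : pvCp a1 ≤ pvCp a2
  · rw [if_pos hle, hkey (a1, a2) (Or.inl ⟨rfl, rfl⟩)]
    simp only [get_animal_element]; rfl
  · rw [if_neg hle, hkey (a2, a1) (Or.inr ⟨rfl, rfl⟩)]
    simp only [get_animal_element]; rfl

-- ===== VERDICT (by name: the statement is the Claim_ definition above) =====
theorem zodiac_compatibility_spec : Claim_equal_zodiac_compatibility := by
  intro a1 a2 _
  unfold Spec_zodiac_compatibility
  by_cases h1 : a1 ∈ pvAnimals
  · by_cases h2 : a2 ∈ pvAnimals
    · exact pv_known_known a1 h1 a2 h2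
    · exact pv_unknown a1 a2 (Or.inr h2)
  · exact pv_unknown a1 a2 (Or.inl h1)
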